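-- pv_equiv track=rewrite | github.com/KumarAmbuj/gfg_string_palindrome | 16.palindrome pair.py | findpairutil
-- ===== SOURCE A (Python) =====
-- def isPalindrome(s):
--     i=0
--     j=len(s)-1
--     while(i<j):
--         if s[i]!=s[j]:
--             return False
--         i+=1
--         j-=1
--     return True
--
-- def findpairutil(arr,s,path):
--     if len(path)==2:
--         if isPalindrome(s):
--             return True
--         return False
--     if len(path)>2:
--         return False
--
--     for i in range(len(arr)):
--         if i not in path:
--             res=s+arr[i]
--             path.append(i)
--             if findpairutil(arr,res,path):
--                 return True
--             path.pop()
--     return False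
--
-- arr = ["abc", "xyxcba", "geekst", "or",
--                                       "keeg", "bc"]
-- ===== SOURCE B (Python) =====
-- # Non-recursive re-implementation: direct case analysis on len(path) instead of
-- # backtracking with a mutable path; palindrome test by string reversal.
-- # Note: A mutates `path` in place (leaves appended indices when it returns True);
-- # B never mutates it — the equivalence claimed is about the return value only.
-- def findpairutil(arr, s, path):
--     k = len(path)
--     if k > 2:
--         return False
--     if k == 2:
--         return s == s[::-1]
--     idx = [i for i in range(len(arr)) if i not in path]
--     if k == 1:
--         for i in idx:
--             t = s + arr[i]
--             if t == t[::-1]: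
--                 return True
--         return False
--     for i in idx:
--         for j in idx:
--             if i != j:
--                 t = s + arr[i] + arr[j]
--                 if t == t[::-1]:
--                     return True
--     return False
-- ===== Notes on version B (the rewrite author's own statement) =====
-- stated objective: simpler
-- what changed: replaces A's recursive backtracking over a mutable path (append/pop, re-entering the function per chosen word) with a flat case analysis on len(path) that directly tests palindromicity of the one- or two-word concatenations via string reversal; B also does not mutate path, which A leaves extended when it returns True
import Mathlib
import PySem

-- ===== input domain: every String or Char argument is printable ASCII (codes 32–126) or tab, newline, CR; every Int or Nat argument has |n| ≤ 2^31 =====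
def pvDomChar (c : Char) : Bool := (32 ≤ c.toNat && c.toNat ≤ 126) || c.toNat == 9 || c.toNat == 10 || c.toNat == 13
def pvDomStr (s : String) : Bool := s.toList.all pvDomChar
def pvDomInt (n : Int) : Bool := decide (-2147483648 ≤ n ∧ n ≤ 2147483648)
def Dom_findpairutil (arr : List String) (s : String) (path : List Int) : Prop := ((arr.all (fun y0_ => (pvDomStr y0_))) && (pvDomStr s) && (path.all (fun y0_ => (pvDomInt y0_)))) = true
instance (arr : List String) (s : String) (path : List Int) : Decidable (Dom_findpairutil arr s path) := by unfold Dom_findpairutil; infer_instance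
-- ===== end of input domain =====

-- B replaces A's recursive backtracking with a flat case analysis on len(path); A mutates
-- `path` in place (it stays extended when A returns True) — the equivalence is about the
-- return value only.

-- ===== PORT A =====
-- two-pointer while loop of isPalindrome; while it runs, 0 ≤ i < j ≤ len-1, so the
-- getD default ' ' is never read (Python would raise only out of range, unreachable here)
def palLoopA (cs : List Char) (i j : Nat) : Bool :=
  if i < j then
    if cs.getD i ' ' ≠ cs.getD j ' ' then false
    else palLoopA cs (i + 1) (j - 1)
  else true
termination_by j - i
decreasing_by omega

def isPalindromeA (cs : List Char) : Bool := palLoopA cs 0 (cs.length - 1)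

-- findpairutil's recursion; Python strings are carried as their char lists (s + arr[i]
-- becomes cs ++ (arr[i]).toList); arr[i] with i from range(len(arr)) is in range, so
-- getD's default "" is never read
def fpuA (arr : List String) (cs : List Char) (path : List Int) : Bool :=
  if path.length = 2 then
    isPalindromeA cs
  else if path.length > 2 then false
  else
    (List.range arr.length).any (fun (i : Nat) =>
      if !(path.contains ((i : Nat) : Int)) then
        fpuA arr (cs ++ (arr.getD i "").toList) (path ++ [((i : Nat) : Int)])
      else false)
termination_by 3 - path.length
decreasing_by simp; omega

def findpairutil (arr : List String) (s : String) (path : List Int) : Bool :=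
  fpuA arr s.toList path

-- ===== PORT B =====
-- s == s[::-1]
def palB (cs : List Char) : Bool := cs == cs.reverse

def findpairutil_alt (arr : List String) (s : String) (path : List Int) : Bool :=
  let k := path.length
  if k > 2 then false
  else if k = 2 then palB s.toList
  else
    let idx : List Nat := (List.range arr.length).filter (fun (i : Nat) => !(path.contains ((i : Nat) : Int)))
    if k = 1 then
      idx.any (fun (i : Nat) => palB (s.toList ++ (arr.getD i "").toList))
    else
      idx.any (fun (i : Nat) => idx.any (fun (j : Nat) =>
        (i != j) && palB (s.toList ++ (arr.getD i "").toList ++ (arr.getD j "").toList)))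

-- ===== PRECONDITION & SPEC =====
def Spec_findpairutil (arr : List String) (s : String) (path : List Int) (out : Bool) : Prop := out = findpairutil_alt arr s path
instance (arr : List String) (s : String) (path : List Int) (out : Bool) : Decidable (Spec_findpairutil arr s path out) := by unfold Spec_findpairutil; infer_instance

-- ===== CLAIM (what is proved, stated in full; the proofs are below) =====
def Claim_equal_findpairutil : Prop := ∀ (arr : List String) (s : String) (path : List Int), Dom_findpairutil arr s path → Spec_findpairutil arr s path (findpairutil arr s path)

-- ===== LEMMAS AND PROOFS =====

theorem palLoopA_iff (cs : List Char) (i j : Nat) :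
    palLoopA cs i j = true ↔
      ∀ k, i ≤ k → k + k < i + j → cs.getD k ' ' = cs.getD (i + j - k) ' ' := by
  fun_induction palLoopA cs i j with
  | case1 i j hij hne =>
    simp only [Bool.false_eq_true, false_iff]
    intro h
    exact hne (by simpa using h i le_rfl (by omega))
  | case2 i j hij heq ih =>
    rw [ih]
    constructor
    · intro h k hk hkk
      rcases Nat.eq_or_lt_of_le hk with rfl | hlt
      · simpa [show i + j - i = j from by omega] using not_not.mp (by simpa using heq)
      · have := h k hlt (by omega)
        simpa [show i + 1 + (j - 1) = i + j from by omega] using this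
    · intro h k hk hkk
      have := h k (by omega) (by omega)
      simpa [show i + 1 + (j - 1) = i + j from by omega] using this
  | case3 i j hij =>
    simp only [true_iff]
    intro k hk hkk
    omega

theorem pal_eq (cs : List Char) : isPalindromeA cs = palB cs := by
  rw [Bool.eq_iff_iff]
  unfold isPalindromeA palB
  rw [palLoopA_iff, beq_iff_eq]
  have hrevD : ∀ k, k < cs.length → cs.reverse.getD k ' ' = cs.getD (cs.length - 1 - k) ' ' := by
    intro k hk
    rw [List.getD_eq_getElem?_getD, List.getD_eq_getElem?_getD, List.getElem?_reverse hk]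
  constructor
  · intro h
    apply List.ext_getElem?
    intro n
    by_cases hn : n < cs.length
    · rw [List.getElem?_reverse hn]
      have h1 : cs[n]? = some (cs.getD n ' ') := by
        rw [List.getElem?_eq_getElem hn, List.getD_eq_getElem cs ' ' hn]
      have h2 : cs[cs.length - 1 - n]? = some (cs.getD (cs.length - 1 - n) ' ') := by
        rw [List.getElem?_eq_getElem (show cs.length - 1 - n < cs.length by omega),
            List.getD_eq_getElem cs ' ' (show cs.length - 1 - n < cs.length by omega)]
      rw [h1, h2]
      refine congrArg some ?_
      rcases lt_trichotomy (n + n) (cs.length - 1) with hlt | heq | hgt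
      · have h3 := h n (Nat.zero_le _) (by omega)
        rwa [show 0 + (cs.length - 1) - n = cs.length - 1 - n from by omega] at h3
      · rw [show cs.length - 1 - n = n from by omega]
      · have h3 := h (cs.length - 1 - n) (Nat.zero_le _) (by omega)
        rw [show 0 + (cs.length - 1) - (cs.length - 1 - n) = n from by omega] at h3
        exact h3.symm
    · rw [List.getElem?_eq_none (le_of_not_gt hn),
          List.getElem?_eq_none (by simpa using le_of_not_gt hn)]
  · intro h k _ hkk
    have hk : k < cs.length := by omega
    have h4 := hrevD k hk
    rw [← h] at h4
    rw [show 0 + (cs.length - 1) - k = cs.length - 1 - k from by omega]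
    exact h4

theorem fpuA_two (arr : List String) (cs : List Char) (a b : Int) :
    fpuA arr cs [a, b] = isPalindromeA cs := by
  rw [fpuA]; simp

theorem fpuA_ge3 (arr : List String) (cs : List Char) (a b c : Int) (r : List Int) :
    fpuA arr cs (a :: b :: c :: r) = false := by
  rw [fpuA]; simp

theorem fpuA_one (arr : List String) (cs : List Char) (a : Int) :
    fpuA arr cs [a] = (List.range arr.length).any (fun (i : Nat) =>
      if !([a].contains ((i : Nat) : Int)) then
        isPalindromeA (cs ++ (arr.getD i "").toList)
      else false) := by
  rw [fpuA]; simp [fpuA_two]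

theorem fpuA_zero (arr : List String) (cs : List Char) :
    fpuA arr cs [] = (List.range arr.length).any (fun (i : Nat) =>
      (List.range arr.length).any (fun (j : Nat) =>
        if !([((i : Nat) : Int)].contains ((j : Nat) : Int)) then
          isPalindromeA (cs ++ (arr.getD i "").toList ++ (arr.getD j "").toList)
        else false)) := by
  rw [fpuA]; simp [fpuA_one]

-- ===== VERDICT (by name: the statement is the Claim_ definition above) =====
theorem findpairutil_spec : Claim_equal_findpairutil := by
  intro arr s path _
  unfold Spec_findpairutil findpairutil
  match path with
  | [a, b] => simp [fpuA_two, findpairutil_alt, pal_eq]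
  | a :: b :: c :: r => simp [fpuA_ge3, findpairutil_alt]
  | [a] =>
    rw [fpuA_one]
    simp only [findpairutil_alt]
    norm_num
    refine congrArg _ (funext fun i => ?_)
    simp [pal_eq]
  | [] =>
    rw [fpuA_zero]
    simp only [findpairutil_alt]
    norm_num
    refine congrArg _ (funext fun i => congrArg _ (funext fun j => ?_))
    by_cases h : i = j
    · subst h; simp
    · simp [h, Ne.symm h, pal_eq]
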